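-- pv_equiv track=rewrite | github.com/peterjhyoon/rsa-math | program.py | public_key_choices
-- ===== SOURCE A (Python) =====
-- def is_prime(n):
--     assert type(n) == int
--     if n < 2:
--         return True
--     else:
--         for i in range(2, n):
--             if n % i == 0: #n has a factor
--                 return False
--         return True
--
-- def gcd(a, b):
--     if b > a:
--         return gcd(b, a)
--     elif a % b == 0:
--         return b
--     return gcd(b, a % b)
--
-- def relatively_prime(a, b):
--     while a > 0 and b > 0:
--         if gcd(a, b) == 1:
--             return True
--         else:
--             return False
--
-- def public_key_choices(totient):
--     assert type(totient) == int
--     possible_keys = []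
--     for e in range(3, totient):
--         if relatively_prime(e, totient):
--             if is_prime(e):
--                 possible_keys.append(e)
--                 e += 1
--             e += 1
--         e += 1
--     return possible_keys
-- ===== SOURCE B (Python) =====
-- def public_key_choices(totient):
--     # Sieve-style: mark every proper multiple j = i*k (k >= 2) of every i >= 2 as
--     # composite once, then collect the unmarked e in [3, totient) not dividing totient.
--     comps = set()
--     for i in range(2, totient):
--         for j in range(2 * i, totient, i):
--             comps.add(j)
--     return [e for e in range(3, totient) if e not in comps and totient % e != 0]
-- ===== Notes on version B (the rewrite author's own statement) =====
-- stated objective: faster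
-- what changed: Replaces per-candidate recursive-gcd coprimality plus full trial division by a single sieve pass (a set of composites built by marking multiples of every i >= 2) and a direct does-e-divide-the-totient test, which for a prime e equals coprimality.
import Mathlib
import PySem

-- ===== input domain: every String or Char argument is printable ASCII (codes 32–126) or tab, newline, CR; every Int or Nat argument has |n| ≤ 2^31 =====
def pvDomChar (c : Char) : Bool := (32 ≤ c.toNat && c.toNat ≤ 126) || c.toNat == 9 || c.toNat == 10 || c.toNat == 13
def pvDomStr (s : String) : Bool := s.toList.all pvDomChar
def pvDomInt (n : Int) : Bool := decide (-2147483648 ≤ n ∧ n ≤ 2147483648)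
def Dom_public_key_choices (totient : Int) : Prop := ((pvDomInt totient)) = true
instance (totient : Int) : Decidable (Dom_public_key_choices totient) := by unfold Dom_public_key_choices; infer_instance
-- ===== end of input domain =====

-- B replaces A's per-candidate recursive-gcd coprimality test and full trial division
-- by one sieve pass (a set of composites) plus a direct does-e-divide-the-totient test.


-- ===== PORT A =====
-- Python's gcd recursion; the fuel 2*a.toNat + 2*b.toNat + 2 is never exhausted on the
-- inputs A reaches (0 < a, 0 < b: gcdFuel_eq_gcd below); elsewhere Python's gcd may
-- recurse forever, which A never triggers.
def gcdFuel : Nat → Int → Int → Int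
  | 0, _, b => b
  | f+1, a, b =>
    if b > a then gcdFuel f b a
    else if PySem.Int.mod a b = 0 then b
    else gcdFuel f b (PySem.Int.mod a b)

def gcdA (a b : Int) : Int := gcdFuel (2*a.toNat + 2*b.toNat + 2) a b

-- 'while a > 0 and b > 0' returns on its first iteration; when the loop never runs
-- Python returns None, used by A only as an if-condition — modelled as false.
def relatively_primeA (a b : Int) : Bool :=
  if a > 0 ∧ b > 0 then gcdA a b == 1 else false

-- the for-loop with early 'return False' and final 'return True' is .all
def is_primeA (n : Int) : Bool :=
  if n < 2 then true
  else (PySem.List.pyRange 2 n 1).all (fun i => !(PySem.Int.mod n i == 0))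

-- the 'e += 1' statements in A's loop body are dead (the range reassigns e); not ported
def public_key_choices (totient : Int) : List Int :=
  (PySem.List.pyRange 3 totient 1).foldl
    (fun acc e =>
      if relatively_primeA e totient then
        (if is_primeA e then acc ++ [e] else acc)
      else acc) []

-- ===== PORT B =====
def public_key_choices_alt (totient : Int) : List Int :=
  let comps : PySem.Set Int :=
    (PySem.List.pyRange 2 totient 1).foldl
      (fun s i => (PySem.List.pyRange (2*i) totient i).foldl (fun s2 j => PySem.Set.add s2 j) s)
      PySem.Set.empty
  (PySem.List.pyRange 3 totient 1).filter
    (fun e => !(PySem.Set.contains comps e) && !(PySem.Int.mod totient e == 0))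

-- ===== PRECONDITION & SPEC =====
def Spec_public_key_choices (totient : Int) (out : List Int) : Prop := out = public_key_choices_alt totient
instance (totient : Int) (out : List Int) : Decidable (Spec_public_key_choices totient out) := by unfold Spec_public_key_choices; infer_instance

-- ===== CLAIM (what is proved, stated in full; the proofs are below) =====
def Claim_equal_public_key_choices : Prop := ∀ (totient : Int), Dom_public_key_choices totient → Spec_public_key_choices totient (public_key_choices totient)

-- ===== LEMMAS AND PROOFS =====

-- the trial-division predicate both programs decide
def NoSmallDiv (e : Int) : Prop := ∀ i : Int, 2 ≤ i → i < e → ¬ i ∣ e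

theorem gcdFuel_eq_gcd (f : Nat) : ∀ (a b : Int), 0 < a → 0 < b → 2 * b.toNat + 1 ≤ f →
    gcdFuel f a b = ((Nat.gcd a.toNat b.toNat : Nat) : Int) := by
  induction f with
  | zero => intro a b _ _ h; omega
  | succ f ih =>
    intro a b ha hb hf
    rw [gcdFuel]
    by_cases hba : b > a
    · rw [if_pos hba, ih b a hb ha (by omega), Nat.gcd_comm]
    · rw [if_neg hba]
      have hab : (0:Int) < b ∧ b ≤ a := ⟨hb, by omega⟩
      by_cases hm : PySem.Int.mod a b = 0
      · rw [if_pos hm]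
        have hdvd : b ∣ a := (PySem.Int.mod_eq_zero_iff_dvd a b).mp hm
        have hdvd' : b.toNat ∣ a.toNat := by
          rw [← Int.natCast_dvd_natCast, Int.toNat_of_nonneg (by omega),
              Int.toNat_of_nonneg (by omega)]
          exact hdvd
        rw [Nat.gcd_eq_right hdvd']
        omega
      · rw [if_neg hm]
        have hme : PySem.Int.mod a b = a % b := PySem.Int.mod_eq_emod_of_pos hb
        have hcast : a % b = ((a.toNat % b.toNat : Nat) : Int) := by
          conv_lhs => rw [show a = ((a.toNat : Nat) : Int) by omega,
                          show b = ((b.toNat : Nat) : Int) by omega]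
          exact_mod_cast rfl
        have hr0 : 0 ≤ a % b := Int.emod_nonneg a (by omega)
        have hrb : a % b < b := Int.emod_lt_of_pos a hb
        have hrpos : 0 < a % b := by rw [hme] at hm; omega
        rw [hme, ih b (a % b) hb hrpos (by omega)]
        have : (a % b).toNat = a.toNat % b.toNat := by omega
        rw [this, Nat.gcd_comm b.toNat, ← Nat.gcd_rec, Nat.gcd_comm]

theorem gcdA_eq_gcd (a b : Int) (ha : 0 < a) (hb : 0 < b) :
    gcdA a b = ((Nat.gcd a.toNat b.toNat : Nat) : Int) :=
  gcdFuel_eq_gcd _ a b ha hb (by omega)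

theorem is_primeA_iff (e : Int) (he : 2 ≤ e) : is_primeA e = true ↔ NoSmallDiv e := by
  rw [is_primeA, if_neg (by omega), List.all_eq_true]
  constructor
  · intro h i h2 hlt hdvd
    have := h i ((PySem.List.mem_pyRange_one).mpr ⟨h2, hlt⟩)
    simp only [Bool.not_eq_eq_eq_not, Bool.not_true, beq_eq_false_iff_ne] at this
    exact this ((PySem.Int.mod_eq_zero_iff_dvd e i).mpr hdvd)
  · intro h i hi
    rcases (PySem.List.mem_pyRange_one).mp hi with ⟨h2, hlt⟩
    simp only [Bool.not_eq_eq_eq_not, Bool.not_true, beq_eq_false_iff_ne]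
    intro hz
    exact h i h2 hlt ((PySem.Int.mod_eq_zero_iff_dvd e i).mp hz)

-- membership in B's composite set
theorem mem_comps_fold (t : Int) (l : List Int) (s : PySem.Set Int) (x : Int) :
    (x ∈ l.foldl (fun s i => (PySem.List.pyRange (2*i) t i).foldl
        (fun s2 j => PySem.Set.add s2 j) s) s)
    ↔ x ∈ s ∨ ∃ i ∈ l, x ∈ PySem.List.pyRange (2*i) t i := by
  induction l generalizing s with
  | nil => simp
  | cons i l ihl =>
    simp only [List.foldl_cons, ihl, List.mem_cons]
    rw [show (fun (s2 : PySem.Set Int) (j : Int) => PySem.Set.add s2 j)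
          = (fun (s2 : PySem.Set Int) (j : Int) => PySem.Set.add s2 (id j)) from rfl,
        PySem.Set.mem_foldl_add]
    constructor
    · rintro (⟨hs | ⟨j, hj, rfl⟩⟩ | ⟨i', hi', hx⟩)
      · exact Or.inl hs
      · exact Or.inr ⟨i, Or.inl rfl, hj⟩
      · exact Or.inr ⟨i', Or.inr hi', hx⟩
    · rintro (hs | ⟨i', hi' | hi', hx⟩)
      · exact Or.inl (Or.inl hs)
      · exact Or.inl (Or.inr ⟨x, by rw [← hi']; exact hx, rfl⟩)
      · exact Or.inr ⟨i', hi', hx⟩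

theorem not_mem_comps_iff (t e : Int) (h3 : 3 ≤ e) (het : e < t) :
    (¬ e ∈ (PySem.List.pyRange 2 t 1).foldl (fun s i =>
        (PySem.List.pyRange (2*i) t i).foldl (fun s2 j => PySem.Set.add s2 j) s)
        PySem.Set.empty)
    ↔ NoSmallDiv e := by
  rw [mem_comps_fold]
  constructor
  · intro h i h2 hlt hdvd
    apply h
    right
    refine ⟨i, (PySem.List.mem_pyRange_one).mpr ⟨by omega, by omega⟩, ?_⟩
    rw [PySem.List.mem_pyRange_iff_of_pos (by omega)]
    rcases hdvd with ⟨k, hk⟩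
    have hk2 : 2 ≤ k := by nlinarith
    refine ⟨by nlinarith, het, ⟨k - 2, by linarith [hk]⟩⟩
  · rintro h (hs | ⟨i, hi, hx⟩)
    · simp [PySem.Set.empty] at hs
    · rcases (PySem.List.mem_pyRange_one).mp hi with ⟨h2, hit⟩
      rw [PySem.List.mem_pyRange_iff_of_pos (by omega)] at hx
      rcases hx with ⟨h2i, hlt, ⟨c, hc⟩⟩
      exact h i h2 (by omega) ⟨c + 2, by linarith⟩

-- for a candidate that passes trial division, gcd(e,t)=1 is exactly t % e ≠ 0
theorem prime_coprime_iff (e t : Int) (h3 : 3 ≤ e) (het : e < t) (hP : NoSmallDiv e) :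
    (Nat.gcd e.toNat t.toNat = 1 ↔ ¬ e ∣ t) := by
  have hprime : e.toNat.Prime := by
    rw [Nat.prime_def_lt']
    refine ⟨by omega, fun m h2 hlt hdvd => ?_⟩
    have hm : (m : Int) ∣ e := by
      have := Int.natCast_dvd_natCast.mpr hdvd
      rwa [Int.toNat_of_nonneg (by omega)] at this
    exact hP m (by omega) (by omega) hm
  have hco : e.toNat.Coprime t.toNat ↔ ¬ e.toNat ∣ t.toNat := hprime.coprime_iff_not_dvd
  have hdt : e.toNat ∣ t.toNat ↔ e ∣ t := by
    rw [← Int.natCast_dvd_natCast, Int.toNat_of_nonneg (by omega),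
        Int.toNat_of_nonneg (by omega)]
  rw [← hdt]
  exact hco

theorem pointwise (t e : Int) (h3 : 3 ≤ e) (het : e < t) :
    (relatively_primeA e t && is_primeA e)
    = (!(PySem.Set.contains ((PySem.List.pyRange 2 t 1).foldl (fun s i =>
        (PySem.List.pyRange (2*i) t i).foldl (fun s2 j => PySem.Set.add s2 j) s)
        PySem.Set.empty) e) && !(PySem.Int.mod t e == 0)) := by
  have he0 : (0:Int) < e := by omega
  have ht0 : (0:Int) < t := by omega
  have hrel : relatively_primeA e t = (gcdA e t == 1) := by
    rw [relatively_primeA, if_pos ⟨he0, ht0⟩]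
  rw [Bool.eq_iff_iff]
  simp only [Bool.and_eq_true, Bool.not_eq_true', beq_eq_false_iff_ne, ne_eq, hrel,
    beq_iff_eq, is_primeA_iff e (by omega)]
  rw [gcdA_eq_gcd e t he0 ht0]
  have hcontains : (PySem.Set.contains ((PySem.List.pyRange 2 t 1).foldl (fun s i =>
        (PySem.List.pyRange (2*i) t i).foldl (fun s2 j => PySem.Set.add s2 j) s)
        PySem.Set.empty) e = false)
      ↔ ¬ e ∈ ((PySem.List.pyRange 2 t 1).foldl (fun s i =>
        (PySem.List.pyRange (2*i) t i).foldl (fun s2 j => PySem.Set.add s2 j) s)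
        PySem.Set.empty) := by
    simp
  rw [hcontains, not_mem_comps_iff t e h3 het]
  have hdvd : PySem.Int.mod t e = 0 ↔ e ∣ t := PySem.Int.mod_eq_zero_iff_dvd t e
  have hgcd1 : ((Nat.gcd e.toNat t.toNat : Nat) : Int) = 1 ↔ Nat.gcd e.toNat t.toNat = 1 := by
    omega
  rw [hgcd1]
  constructor
  · rintro ⟨hg, hP⟩
    exact ⟨hP, fun hz => ((prime_coprime_iff e t h3 het hP).mp hg) (hdvd.mp hz)⟩
  · rintro ⟨hP, hz⟩
    exact ⟨(prime_coprime_iff e t h3 het hP).mpr (fun hd => hz (hdvd.mpr hd)), hP⟩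

-- ===== VERDICT (by name: the statement is the Claim_ definition above) =====
theorem public_key_choices_spec : Claim_equal_public_key_choices := by
  intro t _
  unfold Spec_public_key_choices
  show public_key_choices t = public_key_choices_alt t
  simp only [public_key_choices, public_key_choices_alt]
  have hfun : (fun (acc : List Int) e =>
      if relatively_primeA e t then (if is_primeA e then acc ++ [e] else acc) else acc)
      = fun acc e => if (relatively_primeA e t && is_primeA e) then acc ++ [id e] else acc := by
    funext acc e
    by_cases h1 : relatively_primeA e t = true <;> by_cases h2 : is_primeA e = true <;>
      simp [h1, h2]
  rw [hfun, PySem.List.foldl_append_if, List.map_id, List.nil_append]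
  apply List.filter_congr
  intro e he
  rcases (PySem.List.mem_pyRange_one).mp he with ⟨h3, het⟩
  exact pointwise t e h3 het
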